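-- pv_equiv track=rewrite | github.com/bingshenchen/EyesForRescue | src/utils/calculate_danger.py | calculate_danger
-- ===== SOURCE A (Python) =====
-- def calculate_danger(tracking_data, danger_threshold=5, standup_threshold=3, help_distance_threshold=50):
--     """
--     Calculate the danger score based on tracking data.
--
--     Parameters:
--     tracking_data: List[List[int]] - The tracking data for each frame.
--     danger_threshold: int - The number of frames a person needs to be on the ground to count as a high danger situation.
--     standup_threshold: int - The number of frames a person needs to stay not falling to reduce danger.
--     help_distance_threshold: int - The distance threshold between a falling person and others to consider it as help.
--
--     Returns:
--     int - The calculated danger score.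
--     """
--
--     danger_score = 0
--     fall_duration = []  # Track how long each person has been falling
--     standup_duration = []  # Track how long each person has been standing
--     max_people = max([len(frame) for frame in tracking_data])  # Find the maximum number of people detected
--
--     # Initialize fall and standup duration counters for each person
--     for _ in range(max_people):
--         fall_duration.append(0)
--         standup_duration.append(0)
--
--     for frame in tracking_data:
--         num_falling = sum(frame)
--
--         # Rule 1: If more than one person is falling, add more danger
--         if num_falling == 1:
--             danger_score += 1
--         elif num_falling > 1:
--             danger_score += 2
--
--         # Rule 2: Check fall duration for each person
--         for i in range(len(frame)):
--             if frame[i] == 1: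
--                 fall_duration[i] += 1
--                 standup_duration[i] = 0  # Reset standup duration if falling
--
--                 # If person has been falling for too long, increase danger score
--                 if fall_duration[i] >= danger_threshold:
--                     danger_score += 1
--             else:
--                 standup_duration[i] += 1  # Increment standup duration if not falling
--                 fall_duration[i] = 0  # Reset fall duration if standing
--
--                 # If person has been standing for a while, reduce danger score
--                 if standup_duration[i] >= standup_threshold:
--                     danger_score = max(0, danger_score - 1)  # Danger score can't go below 0
--
--         # Rule 3: Check for help (if there are other people close to the falling person)
--         for i in range(len(frame)):
--             if frame[i] == 1:  # Only check for help if the person is falling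
--                 for j in range(len(frame)):
--                     if i != j and frame[j] == 0:  # Another person is nearby and not falling
--                         # Here you can add logic to check the distance between person i and j (e.g., using bbox coordinates)
--                         # For now, we'll assume if another person is present and not falling, they are close enough
--                         danger_score = max(0, danger_score - 1)  # Reduce danger score if help is detected
--
--     return danger_score
-- ===== SOURCE B (Python) =====
-- def calculate_danger(tracking_data, danger_threshold=5, standup_threshold=3, help_distance_threshold=50):
--     """Same score: lazy per-person duration dicts (no max_people pre-pass)
--     and the per-pair help loop replaced by one clamped subtraction of falling*standing."""
--     score = 0
--     fall = {}   # person index -> consecutive falling frames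
--     stand = {}  # person index -> consecutive non-falling frames
--     for frame in tracking_data:
--         num_falling = sum(frame)
--         if num_falling == 1:
--             score += 1
--         elif num_falling > 1:
--             score += 2
--         ones = 0   # entries equal to 1 (falling)
--         zeros = 0  # entries equal to 0 (potential helpers)
--         for i, v in enumerate(frame):
--             if v == 1:
--                 ones += 1
--                 fall[i] = fall.get(i, 0) + 1
--                 stand[i] = 0
--                 if fall[i] >= danger_threshold:
--                     score += 1
--             else:
--                 if v == 0:
--                     zeros += 1
--                 stand[i] = stand.get(i, 0) + 1
--                 fall[i] = 0
--                 if stand[i] >= standup_threshold: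
--                     score = max(0, score - 1)
--         # each (falling i, standing j) pair decrements the score, clamped at 0
--         score = max(0, score - ones * zeros)
--     return score
-- ===== Notes on version B (the rewrite author's own statement) =====
-- stated objective: alternative
-- what changed: The nested help loop over person pairs is replaced by counting falling (==1) and standing (==0) entries in the single per-person pass and applying one clamped subtraction max(0, score - ones*zeros); the max_people pre-pass and pre-sized duration arrays are replaced by lazily-growing dicts.
-- outside the precondition, e.g. on calculate_danger([], 5, 3, 50): A raises ValueError, B returns 0
import Mathlib
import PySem

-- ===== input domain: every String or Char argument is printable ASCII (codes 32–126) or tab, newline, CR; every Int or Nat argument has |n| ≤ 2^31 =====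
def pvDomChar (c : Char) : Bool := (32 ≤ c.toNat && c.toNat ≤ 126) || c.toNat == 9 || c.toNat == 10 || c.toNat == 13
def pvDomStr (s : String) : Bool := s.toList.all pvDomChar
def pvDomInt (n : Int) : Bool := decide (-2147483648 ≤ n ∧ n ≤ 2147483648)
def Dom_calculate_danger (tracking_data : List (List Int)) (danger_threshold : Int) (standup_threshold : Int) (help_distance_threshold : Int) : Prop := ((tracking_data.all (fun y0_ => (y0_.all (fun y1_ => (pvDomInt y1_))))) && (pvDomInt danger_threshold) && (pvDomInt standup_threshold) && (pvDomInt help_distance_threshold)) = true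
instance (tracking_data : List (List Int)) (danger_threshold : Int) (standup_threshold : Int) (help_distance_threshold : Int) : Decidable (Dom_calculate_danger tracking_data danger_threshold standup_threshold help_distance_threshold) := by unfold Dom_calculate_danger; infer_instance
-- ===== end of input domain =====

-- B replaces A's nested per-pair help loop by one clamped subtraction
-- max(0, score - ones*zeros) per frame and the max_people pre-sized arrays by
-- lazily-grown dicts (objective: alternative).

-- ===== PORT A =====
-- Rule 2 body for one person index i (indices are always in range: i < len(frame) ≤ max_people,
-- so Python's frame[i] / fall_duration[i] are ported with the in-range getD/set).
def pvA_rule2 (frame : List Int) (dt st : Int)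
    (s : Int × List Int × List Int) (i : Nat) : Int × List Int × List Int :=
  if frame.getD i 0 = 1 then
    let fall' := s.2.1.set i (s.2.1.getD i 0 + 1)
    let stand' := s.2.2.set i 0
    (if dt ≤ fall'.getD i 0 then s.1 + 1 else s.1, fall', stand')
  else
    let stand' := s.2.2.set i (s.2.2.getD i 0 + 1)
    let fall' := s.2.1.set i 0
    (if st ≤ stand'.getD i 0 then max 0 (s.1 - 1) else s.1, fall', stand')

-- Rule 3: the nested help loop.
def pvA_rule3 (frame : List Int) (score : Int) : Int :=
  (List.range frame.length).foldl (fun s i =>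
    if frame.getD i 0 = 1 then
      (List.range frame.length).foldl (fun s2 j =>
        if i ≠ j ∧ frame.getD j 0 = 0 then max 0 (s2 - 1) else s2) s
    else s) score

-- one iteration of A's main frame loop
def pvA_frame (dt st : Int) (s : Int × List Int × List Int) (frame : List Int) :
    Int × List Int × List Int :=
  let numFalling := frame.foldl (· + ·) 0
  let score1 := if numFalling = 1 then s.1 + 1 else if 1 < numFalling then s.1 + 2 else s.1
  let t := (List.range frame.length).foldl (pvA_rule2 frame dt st) (score1, s.2.1, s.2.2)
  (pvA_rule3 frame t.1, t.2.1, t.2.2)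

def calculate_danger (tracking_data : List (List Int)) (danger_threshold : Int) (standup_threshold : Int) (help_distance_threshold : Int) : Int :=
  -- max([len(frame) for frame in tracking_data]); Python raises on [] (excluded by Pre_)
  let max_people := (tracking_data.map List.length).foldl Nat.max 0
  let init : Int × List Int × List Int :=
    (0, List.replicate max_people 0, List.replicate max_people 0)
  (tracking_data.foldl (pvA_frame danger_threshold standup_threshold) init).1

-- ===== PORT B =====
-- body of B's single per-person pass: state (score, ones, zeros, fall, stand)
def pvB_person (dt st : Int)
    (s : Int × Int × Int × PySem.Dict Int Int × PySem.Dict Int Int)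
    (p : Int × Int) : Int × Int × Int × PySem.Dict Int Int × PySem.Dict Int Int :=
  if p.2 = 1 then
    let fall' := (s.2.2.2.1).insert p.1 ((s.2.2.2.1).getD p.1 0 + 1)
    let stand' := (s.2.2.2.2).insert p.1 0
    (if dt ≤ fall'.getD p.1 0 then s.1 + 1 else s.1, s.2.1 + 1, s.2.2.1, fall', stand')
  else
    let zeros' := if p.2 = 0 then s.2.2.1 + 1 else s.2.2.1
    let stand' := (s.2.2.2.2).insert p.1 ((s.2.2.2.2).getD p.1 0 + 1)
    let fall' := (s.2.2.2.1).insert p.1 0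
    (if st ≤ stand'.getD p.1 0 then max 0 (s.1 - 1) else s.1, s.2.1, zeros', fall', stand')

-- one iteration of B's main frame loop
def pvB_frame (dt st : Int) (s : Int × PySem.Dict Int Int × PySem.Dict Int Int)
    (frame : List Int) : Int × PySem.Dict Int Int × PySem.Dict Int Int :=
  let numFalling := frame.foldl (· + ·) 0
  let score1 := if numFalling = 1 then s.1 + 1 else if 1 < numFalling then s.1 + 2 else s.1
  let t := (PySem.List.enumerate frame 0).foldl (pvB_person dt st) (score1, 0, 0, s.2.1, s.2.2)
  (max 0 (t.1 - t.2.1 * t.2.2.1), t.2.2.2.1, t.2.2.2.2)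

def calculate_danger_alt (tracking_data : List (List Int)) (danger_threshold : Int) (standup_threshold : Int) (help_distance_threshold : Int) : Int :=
  (tracking_data.foldl (pvB_frame danger_threshold standup_threshold)
    (0, PySem.Dict.empty, PySem.Dict.empty)).1

-- ===== PRECONDITION & SPEC =====
-- Pre_ excludes only the empty frame list, on which Python A raises ValueError (max of empty sequence).
def Pre_calculate_danger (tracking_data : List (List Int)) (danger_threshold : Int) (standup_threshold : Int) (help_distance_threshold : Int) : Prop := tracking_data ≠ []
instance (tracking_data : List (List Int)) (danger_threshold : Int) (standup_threshold : Int) (help_distance_threshold : Int) : Decidable (Pre_calculate_danger tracking_data danger_threshold standup_threshold help_distance_threshold) := by unfold Pre_calculate_danger; infer_instance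
def pvWitness_calculate_danger : List (List Int) × Int × Int × Int := ([[1, 0], [1, 1], [0, 0]], 2, 2, 50)

def Spec_calculate_danger (tracking_data : List (List Int)) (danger_threshold : Int) (standup_threshold : Int) (help_distance_threshold : Int) (out : Int) : Prop := out = calculate_danger_alt tracking_data danger_threshold standup_threshold help_distance_threshold
instance (tracking_data : List (List Int)) (danger_threshold : Int) (standup_threshold : Int) (help_distance_threshold : Int) (out : Int) : Decidable (Spec_calculate_danger tracking_data danger_threshold standup_threshold help_distance_threshold out) := by unfold Spec_calculate_danger; infer_instance

-- ===== CLAIM (what is proved, stated in full; the proofs are below) =====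
def Claim_equal_calculate_danger : Prop := ∀ (tracking_data : List (List Int)) (danger_threshold : Int) (standup_threshold : Int) (help_distance_threshold : Int), Dom_calculate_danger tracking_data danger_threshold standup_threshold help_distance_threshold → Pre_calculate_danger tracking_data danger_threshold standup_threshold help_distance_threshold → Spec_calculate_danger tracking_data danger_threshold standup_threshold help_distance_threshold (calculate_danger tracking_data danger_threshold standup_threshold help_distance_threshold)

-- ===== LEMMAS AND PROOFS =====

-- the coupling between A's frame-loop state and B's frame-loop state
def pvRel (N : Nat) (a : Int × List Int × List Int)
    (b : Int × PySem.Dict Int Int × PySem.Dict Int Int) : Prop :=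
  a.1 = b.1 ∧ 0 ≤ a.1 ∧ a.2.1.length = N ∧ a.2.2.length = N ∧
  (∀ i : Nat, a.2.1.getD i 0 = b.2.1.getD (i : Int) 0) ∧
  (∀ i : Nat, a.2.2.getD i 0 = b.2.2.getD (i : Int) 0)

lemma pv_getD_set_self (xs : List Int) (i : Nat) (v : Int) (h : i < xs.length) :
    (xs.set i v).getD i 0 = v := by
  simp [List.getD, h]

lemma pv_getD_set_ne (xs : List Int) (i j : Nat) (v : Int) (h : i ≠ j) :
    (xs.set i v).getD j 0 = xs.getD j 0 := by
  simp [List.getD, List.getElem?_set_ne h]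

lemma pv_enum_eq_gen : ∀ (xs : List Int) (s : Int), PySem.List.enumerate xs s
    = (List.range xs.length).map (fun (i : Nat) => (s + i, xs.getD i 0)) := by
  intro xs
  induction xs with
  | nil => intro s; simp [PySem.List.enumerate_nil]
  | cons x xs ih =>
    intro s
    rw [List.length_cons, List.range_succ_eq_map, PySem.List.enumerate_cons, ih,
      List.map_cons, List.map_map]
    congr 1
    · simp
    · apply List.map_congr_left
      intro i _
      simp [Function.comp, Prod.ext_iff]
      ring

lemma pv_enum_eq (frame : List Int) :
    PySem.List.enumerate frame 0 =
      (List.range frame.length).map (fun (i : Nat) => ((i : Int), frame.getD i 0)) := by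
  rw [pv_enum_eq_gen]
  apply List.map_congr_left
  intro i _
  simp

-- repeated clamped decrement = one clamped subtraction of the count
lemma pv_clamp_fold {γ : Type} (p : γ → Prop) [DecidablePred p] (l : List γ) :
    ∀ s : Int, 0 ≤ s →
      l.foldl (fun s2 j => if p j then max 0 (s2 - 1) else s2) s
        = max 0 (s - l.countP (fun j => decide (p j))) := by
  induction l with
  | nil => intro s hs; simp; omega
  | cons x l ih =>
    intro s hs
    by_cases h : p x
    · rw [List.foldl_cons, if_pos h, ih _ (le_max_left 0 (s - 1)), List.countP_cons]
      simp [h]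
      omega
    · rw [List.foldl_cons, if_neg h, ih _ hs, List.countP_cons]
      simp [h]

lemma pv_clamp_max (s z t : Int) (hz : 0 ≤ z) (ht : 0 ≤ t) :
    max 0 (max 0 (s - z) - t) = max 0 (s - (z + t)) := by omega

-- A's rule 3 (the nested help loop) equals one clamped subtraction of ones*zeros
lemma pv_rule3_gen (frame : List Int) (l : List Nat) :
    ∀ s : Int, 0 ≤ s →
      l.foldl (fun s i =>
        if frame.getD i 0 = 1 then
          (List.range frame.length).foldl (fun s2 j =>
            if i ≠ j ∧ frame.getD j 0 = 0 then max 0 (s2 - 1) else s2) s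
        else s) s
      = max 0 (s - (l.countP (fun i => decide (frame.getD i 0 = 1)) : Int)
                  * ((List.range frame.length).countP (fun j => decide (frame.getD j 0 = 0)) : Int)) := by
  induction l with
  | nil => intro s hs; simp; omega
  | cons i l ih =>
    intro s hs
    rw [List.foldl_cons, List.countP_cons]
    by_cases h : frame.getD i 0 = 1
    · rw [if_pos h, pv_clamp_fold (fun j => i ≠ j ∧ frame.getD j 0 = 0) _ s hs]
      have hc : (List.range frame.length).countP (fun j => decide (i ≠ j ∧ frame.getD j 0 = 0))
          = (List.range frame.length).countP (fun j => decide (frame.getD j 0 = 0)) := by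
        apply List.countP_congr
        intro j _
        by_cases hj : i = j
        · subst hj; simp only [List.getD] at h; simp [h]
        · simp [hj]
      rw [hc, ih _ (le_max_left _ _)]
      simp only [h, decide_true, if_true]
      push_cast
      rw [pv_clamp_max _ _ _ (by positivity) (by positivity)]
      ring_nf
    · rw [if_neg h, ih _ hs]
      simp only [List.getD] at h
      simp [h]

lemma pv_rule3_eq (frame : List Int) (s : Int) (hs : 0 ≤ s) :
    pvA_rule3 frame s =
      max 0 (s - ((List.range frame.length).countP (fun i => decide (frame.getD i 0 = 1)) : Int)
                 * ((List.range frame.length).countP (fun j => decide (frame.getD j 0 = 0)) : Int)) := by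
  exact pv_rule3_gen frame (List.range frame.length) s hs

-- B's ones/zeros counters count the 1s and 0s among the processed indices
lemma pv_counts (frame : List Int) (dt st : Int) (l : List Nat) :
    ∀ b, ((l.foldl (fun b (i : Nat) => pvB_person dt st b ((i : Int), frame.getD i 0)) b).2.1
            = b.2.1 + (l.countP (fun i => decide (frame.getD i 0 = 1)) : Int))
       ∧ ((l.foldl (fun b (i : Nat) => pvB_person dt st b ((i : Int), frame.getD i 0)) b).2.2.1
            = b.2.2.1 + (l.countP (fun i => decide (frame.getD i 0 = 0)) : Int)) := by
  induction l with
  | nil => intro b; simp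
  | cons i l ih =>
    intro b
    rw [List.foldl_cons]
    obtain ⟨h1, h2⟩ := ih (pvB_person dt st b ((i : Int), frame.getD i 0))
    rw [h1, h2, List.countP_cons, List.countP_cons]
    by_cases h : frame.getD i 0 = 1
    · have h0 : ¬ frame.getD i 0 = 0 := by rw [h]; norm_num
      simp only [List.getD] at h h0
      simp [pvB_person, h, h0] <;> omega
    · by_cases h0 : frame.getD i 0 = 0 <;>
        · simp only [List.getD] at h h0
          simp [pvB_person, h, h0] <;> omega

-- rule-2 step preserves the coupling (plus B's counters, which pv_counts tracks)
lemma pv_step (frame : List Int) (dt st : Int) (N : Nat) (hf : frame.length ≤ N)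
    (i : Nat) (hi : i < frame.length) (a : Int × List Int × List Int)
    (b : Int × Int × Int × PySem.Dict Int Int × PySem.Dict Int Int)
    (h : pvRel N a (b.1, b.2.2.2.1, b.2.2.2.2)) :
    pvRel N (pvA_rule2 frame dt st a i)
      (let b' := pvB_person dt st b ((i : Int), frame.getD i 0)
       (b'.1, b'.2.2.2.1, b'.2.2.2.2)) := by
  obtain ⟨hs, hnn, hlf, hls, hfall, hstand⟩ := h
  simp only at hs hfall hstand
  have hif : i < a.2.1.length := by omega
  have his : i < a.2.2.length := by omega
  by_cases hv : frame.getD i 0 = 1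
  · simp only [pvA_rule2, pvB_person, pvRel, hv, if_pos rfl, if_true]
    rw [pv_getD_set_self _ _ _ hif, PySem.Dict.getD_insert, if_pos rfl,
      hfall i]
    refine ⟨by split <;> simp [hs], by split <;> omega, by simpa using hlf, by simpa using hls, ?_, ?_⟩
    · intro j
      by_cases hj : j = i
      · subst hj
        rw [pv_getD_set_self _ _ _ hif, PySem.Dict.getD_insert, if_pos rfl]
      · rw [pv_getD_set_ne _ _ _ _ (fun hh => hj hh.symm), PySem.Dict.getD_insert,
          if_neg (by exact_mod_cast hj), hfall j]
    · intro j
      by_cases hj : j = i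
      · subst hj
        rw [pv_getD_set_self _ _ _ his, PySem.Dict.getD_insert, if_pos rfl]
      · rw [pv_getD_set_ne _ _ _ _ (fun hh => hj hh.symm), PySem.Dict.getD_insert,
          if_neg (by exact_mod_cast hj), hstand j]
  · simp only [pvA_rule2, pvB_person, pvRel, hv, if_neg (fun hh => hv hh), if_false]
    rw [pv_getD_set_self _ _ _ his, PySem.Dict.getD_insert, if_pos rfl,
      hstand i]
    refine ⟨by split <;> simp [hs], by split <;> omega, by simpa using hlf, by simpa using hls, ?_, ?_⟩
    · intro j
      by_cases hj : j = i
      · subst hj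
        rw [pv_getD_set_self _ _ _ hif, PySem.Dict.getD_insert, if_pos rfl]
      · rw [pv_getD_set_ne _ _ _ _ (fun hh => hj hh.symm), PySem.Dict.getD_insert,
          if_neg (by exact_mod_cast hj), hfall j]
    · intro j
      by_cases hj : j = i
      · subst hj
        rw [pv_getD_set_self _ _ _ his, PySem.Dict.getD_insert, if_pos rfl]
      · rw [pv_getD_set_ne _ _ _ _ (fun hh => hj hh.symm), PySem.Dict.getD_insert,
          if_neg (by exact_mod_cast hj), hstand j]

-- the whole rule-2 loop preserves the coupling
lemma pv_loop (frame : List Int) (dt st : Int) (N : Nat) (hf : frame.length ≤ N)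
    (l : List Nat) (hl : ∀ i ∈ l, i < frame.length) :
    ∀ a b, pvRel N a (b.1, b.2.2.2.1, b.2.2.2.2) →
      pvRel N (l.foldl (pvA_rule2 frame dt st) a)
        (let b' := l.foldl (fun b (i : Nat) => pvB_person dt st b ((i : Int), frame.getD i 0)) b
         (b'.1, b'.2.2.2.1, b'.2.2.2.2)) := by
  induction l with
  | nil => intro a b h; exact h
  | cons i l ih =>
    intro a b h
    rw [List.foldl_cons, List.foldl_cons]
    exact ih (fun j hj => hl j (List.mem_cons_of_mem i hj)) _ _
      (pv_step frame dt st N hf i (hl i List.mem_cons_self) a b h)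

-- one frame preserves the coupling
lemma pv_frame_rel (frame : List Int) (dt st : Int) (N : Nat) (hf : frame.length ≤ N)
    (a : Int × List Int × List Int) (b : Int × PySem.Dict Int Int × PySem.Dict Int Int)
    (h : pvRel N a b) :
    pvRel N (pvA_frame dt st a frame) (pvB_frame dt st b frame) := by
  obtain ⟨hs, hnn, hlf, hls, hfall, hstand⟩ := h
  simp only [pvA_frame, pvB_frame, pv_enum_eq, List.foldl_map]
  have hsc1 : (if frame.foldl (· + ·) 0 = 1 then a.1 + 1 else if 1 < frame.foldl (· + ·) 0 then a.1 + 2 else a.1)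
      = (if frame.foldl (· + ·) 0 = 1 then b.1 + 1 else if 1 < frame.foldl (· + ·) 0 then b.1 + 2 else b.1) := by
    rw [hs]
  have hrel := pv_loop frame dt st N hf (List.range frame.length)
    (fun i hi => List.mem_range.mp hi)
    (if frame.foldl (· + ·) 0 = 1 then a.1 + 1 else if 1 < frame.foldl (· + ·) 0 then a.1 + 2 else a.1, a.2.1, a.2.2)
    (if frame.foldl (· + ·) 0 = 1 then b.1 + 1 else if 1 < frame.foldl (· + ·) 0 then b.1 + 2 else b.1, 0, 0, b.2.1, b.2.2)
    ⟨hsc1, by dsimp only; split <;> (try split) <;> omega, hlf, hls, hfall, hstand⟩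
  obtain ⟨hs', hnn', hlf', hls', hfall', hstand'⟩ := hrel
  obtain ⟨hones, hzeros⟩ := pv_counts frame dt st (List.range frame.length)
    (if frame.foldl (· + ·) 0 = 1 then b.1 + 1 else if 1 < frame.foldl (· + ·) 0 then b.1 + 2 else b.1, 0, 0, b.2.1, b.2.2)
  refine ⟨?_, ?_, hlf', hls', hfall', hstand'⟩
  · simp only at hs' hones hzeros ⊢
    rw [pv_rule3_eq _ _ hnn', hs', hones, hzeros]
    push_cast
    ring_nf
  · simp only
    rw [pv_rule3_eq _ _ hnn']
    positivity

lemma pv_fold_rel (td : List (List Int)) (dt st : Int) (N : Nat)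
    (hf : ∀ f ∈ td, f.length ≤ N) :
    ∀ a b, pvRel N a b →
      pvRel N (td.foldl (pvA_frame dt st) a) (td.foldl (pvB_frame dt st) b) := by
  induction td with
  | nil => intro a b h; exact h
  | cons f td ih =>
    intro a b h
    rw [List.foldl_cons, List.foldl_cons]
    exact ih (fun g hg => hf g (List.mem_cons_of_mem f hg)) _ _
      (pv_frame_rel f dt st N (hf f List.mem_cons_self) a b h)

lemma pv_base_le (l : List Nat) : ∀ a, a ≤ l.foldl Nat.max a := by
  induction l with
  | nil => intro a; simp
  | cons x l ih => intro a; exact le_trans (Nat.le_max_left a x) (ih _)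

lemma pv_maxlen (td : List (List Int)) :
    ∀ f ∈ td, f.length ≤ (td.map List.length).foldl Nat.max 0 := by
  have key : ∀ (l : List Nat) (a : Nat), ∀ x ∈ l, x ≤ l.foldl Nat.max a := by
    intro l
    induction l with
    | nil => simp
    | cons y l ih =>
      intro a x hx
      rcases List.mem_cons.mp hx with h | h
      · subst h; exact le_trans (Nat.le_max_right a x) (pv_base_le l _)
      · exact ih _ x h
  intro f hf
  exact key (td.map List.length) 0 f.length (List.mem_map_of_mem hf)

-- ===== VERDICT (by name: the statement is the Claim_ definition above) =====
theorem calculate_danger_spec : Claim_equal_calculate_danger := by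
  intro td dt st hd _ _
  unfold Spec_calculate_danger calculate_danger calculate_danger_alt
  have h := pv_fold_rel td dt st ((td.map List.length).foldl Nat.max 0) (pv_maxlen td)
    (0, List.replicate _ 0, List.replicate _ 0) (0, PySem.Dict.empty, PySem.Dict.empty)
    (by
      refine ⟨rfl, le_refl 0, List.length_replicate, List.length_replicate, ?_, ?_⟩ <;>
        intro i <;> simp [PySem.Dict.getD_empty, List.getD]
    )
  exact h.1
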